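-- pv_equiv track=rewrite | github.com/chinrachel97/regex-generator | generate.py | composeMatrix
-- ===== SOURCE A (Python) =====
-- def composeMatrix(inputStrings):
--     # initialize a list with the length of the input strings
--     inputStringsLen = [len(s) for s in inputStrings]
--
--     # get the maximum string length
--     maxStrLen = 0
--     for s in inputStrings:
--         maxStrLen = max(inputStringsLen)
--
--     # create the matrix of input string characters
--     m = [[] for x in range(maxStrLen)]
--     for row in range(maxStrLen):
--         for s in inputStrings:
--             if row < len(s):
--                 m[row].append(s[row])
--             else:
--                 m[row].append("EOS")
--
--     return m
-- ===== SOURCE B (Python) =====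
-- def composeMatrix(inputStrings):
--     # Build the matrix incrementally: merge each string into the rows built so far,
--     # extending existing rows and appending new EOS-padded rows for extra characters.
--     m = []
--     for k, s in enumerate(inputStrings):
--         for i, row in enumerate(m):
--             row.append(s[i] if i < len(s) else "EOS")
--         for i in range(len(m), len(s)):
--             m.append(["EOS"] * k + [s[i]])
--     return m
-- ===== Notes on version B (the rewrite author's own statement) =====
-- stated objective: faster
-- what changed: A preallocates maxStrLen rows (recomputing max(inputStringsLen) once per string, an O(n^2) pass) and fills them row-by-row with an inner scan over all strings; B never computes the maximum at all and instead folds over the strings, merging each one into the matrix built so far: it extends every existing row by one cell and appends new EOS-padded rows for characters beyond the current height.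
import Mathlib
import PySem

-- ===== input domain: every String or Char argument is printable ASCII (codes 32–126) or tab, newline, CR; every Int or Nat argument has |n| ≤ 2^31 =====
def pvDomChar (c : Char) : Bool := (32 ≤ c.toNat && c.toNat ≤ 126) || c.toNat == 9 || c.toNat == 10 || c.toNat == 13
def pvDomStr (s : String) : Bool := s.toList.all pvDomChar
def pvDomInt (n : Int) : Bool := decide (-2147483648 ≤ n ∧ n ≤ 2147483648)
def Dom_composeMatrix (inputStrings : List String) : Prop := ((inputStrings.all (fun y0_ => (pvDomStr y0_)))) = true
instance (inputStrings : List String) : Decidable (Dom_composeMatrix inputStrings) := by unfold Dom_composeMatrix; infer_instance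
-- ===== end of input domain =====

-- B builds the matrix incrementally, merging one string at a time into the rows built so
-- far (no maximum-length precomputation, no preallocated row skeleton): an alternative
-- decomposition of the same padded-transpose task.

-- ===== PORT A =====
def composeMatrix (inputStrings : List String) : List (List String) :=
  -- inputStringsLen = [len(s) for s in inputStrings]
  let inputStringsLen : List Int := inputStrings.map (fun s => PySem.Str.len s)
  -- maxStrLen = 0; for s in inputStrings: maxStrLen = max(inputStringsLen)
  -- (Python's max raises on an empty list, but the loop body only runs when inputStrings,
  --  hence inputStringsLen, is nonempty; the .getD 0 totalisation is never reached)
  let maxStrLen : Int :=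
    inputStrings.foldl (fun _maxStrLen _s => (PySem.List.max? inputStringsLen (fun x => x)).getD 0) 0
  -- m = [[] for x in range(maxStrLen)]
  let m : List (List String) := (PySem.List.pyRange 0 maxStrLen 1).map (fun _ => ([] : List String))
  -- for row in range(maxStrLen): for s in inputStrings: m[row].append(s[row] if row < len(s) else "EOS")
  (PySem.List.pyRange 0 maxStrLen 1).foldl (fun m row =>
    inputStrings.foldl (fun m s =>
      PySem.List.pySetD m row (PySem.List.pyGetD m row [] ++
        [if row < PySem.Str.len s
         then ((PySem.Str.pyGet? s row).map (fun c => String.singleton c)).getD "EOS"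
         else "EOS"])) m) m

-- ===== PORT B =====
-- merge one string (as its character list) into the matrix built so far:
-- extend each existing row by one cell, then append new rows (EOS-padded for the
-- k strings already merged) for the characters beyond the current height
def mergeStr (m : List (List String)) (cs : List Char) (k : Nat) : List (List String) :=
  match m, cs with
  | [], [] => []
  | [], c :: cs' => (List.replicate k "EOS" ++ [String.singleton c]) :: mergeStr [] cs' k
  | row :: m', [] => (row ++ ["EOS"]) :: mergeStr m' [] k
  | row :: m', c :: cs' => (row ++ [String.singleton c]) :: mergeStr m' cs' k
termination_by m.length + cs.length

def composeMatrix_alt (inputStrings : List String) : List (List String) :=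
  (inputStrings.foldl (fun (st : List (List String) × Nat) s =>
    (mergeStr st.1 s.toList st.2, st.2 + 1)) ([], 0)).1

-- ===== PRECONDITION & SPEC =====
def Spec_composeMatrix (inputStrings : List String) (out : List (List String)) : Prop := out = composeMatrix_alt inputStrings
instance (inputStrings : List String) (out : List (List String)) : Decidable (Spec_composeMatrix inputStrings out) := by unfold Spec_composeMatrix; infer_instance

-- ===== CLAIM =====
def Claim_equal_composeMatrix : Prop := ∀ (inputStrings : List String), Dom_composeMatrix inputStrings → Spec_composeMatrix inputStrings (composeMatrix inputStrings)

-- ===== LEMMAS AND PROOFS =====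

-- the maximal string length of a list of character columns
def zlMax : List (List Char) → Nat
  | [] => 0
  | c :: cs => max c.length (zlMax cs)

-- the entry both programs place at row r for a character column c
def zlEntry (r : Nat) (c : List Char) : String := (Option.map String.singleton (getElem? c r)).getD "EOS"

-- the common normal form: one row per position below the maximum length
def rangeForm (l : List String) : List (List String) :=
  (List.range (zlMax (l.map String.toList))).map (fun r => l.map (fun s => zlEntry r s.toList))

theorem zlEntry_eos (r : Nat) (c : List Char) (h : c.length ≤ r) : zlEntry r c = "EOS" := by
  simp [zlEntry, List.getElem?_eq_none h]

theorem zlEntry_succ (r : Nat) (c : Char) (cs : List Char) :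
    zlEntry (r + 1) (c :: cs) = zlEntry r cs := by
  simp [zlEntry]

theorem zlMax_le (l : List String) (t : String) (ht : t ∈ l) :
    t.toList.length ≤ zlMax (l.map String.toList) := by
  induction l with
  | nil => cases ht
  | cons s l ih =>
    rcases List.mem_cons.mp ht with h | h
    · subst h; simp [zlMax]
    · simp only [List.map_cons, zlMax]
      exact le_trans (ih h) (Nat.le_max_right _ _)

theorem zlMax_append (xs : List (List Char)) (c : List Char) :
    zlMax (xs ++ [c]) = max (zlMax xs) c.length := by
  induction xs with
  | nil => simp [zlMax]
  | cons x xs ih => simp only [List.cons_append, zlMax, ih]; omega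

-- mergeStr in closed form
theorem mergeStr_nil_eq (k : Nat) : ∀ cs : List Char,
    mergeStr [] cs k
      = (List.range cs.length).map (fun i => List.replicate k "EOS" ++ [zlEntry i cs]) := by
  intro cs
  induction cs with
  | nil => simp [mergeStr]
  | cons c cs' ih =>
    rw [mergeStr, ih, List.length_cons, List.range_succ_eq_map, List.map_cons, List.map_map]
    exact congr_arg₂ List.cons (by simp [zlEntry])
      (List.map_congr_left fun i _ => by simp [Function.comp, zlEntry_succ])

theorem mergeStr_eq (k : Nat) : ∀ (m : List (List String)) (cs : List Char),
    mergeStr m cs k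
      = (List.range (max m.length cs.length)).map
          (fun i => (m.getD i (List.replicate k "EOS")) ++ [zlEntry i cs]) := by
  intro m
  induction m with
  | nil =>
    intro cs
    rw [mergeStr_nil_eq]
    simp only [List.length_nil, Nat.zero_max]
    exact List.map_congr_left fun i _ => by simp [List.getD]
  | cons row m' ih =>
    intro cs
    cases cs with
    | nil =>
      rw [mergeStr, ih]
      simp only [List.length_cons, List.length_nil, Nat.max_zero]
      rw [List.range_succ_eq_map, List.map_cons, List.map_map]
      exact congr_arg₂ List.cons (by simp [List.getD, zlEntry])
        (List.map_congr_left fun i _ => by simp [Function.comp, List.getD, zlEntry])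
    | cons c cs' =>
      rw [mergeStr, ih]
      simp only [List.length_cons]
      have hmx : max (m'.length + 1) (cs'.length + 1) = (max m'.length cs'.length) + 1 := by
        omega
      rw [hmx, List.range_succ_eq_map, List.map_cons, List.map_map]
      exact congr_arg₂ List.cons (by simp [List.getD, zlEntry])
        (List.map_congr_left fun i _ => by simp [Function.comp, List.getD, zlEntry_succ])

theorem rangeForm_length (l : List String) :
    (rangeForm l).length = zlMax (l.map String.toList) := by
  simp [rangeForm]

-- merging one more string takes the normal form of l to that of l ++ [s]
theorem mergeStr_rangeForm (l : List String) (s : String) :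
    mergeStr (rangeForm l) s.toList l.length = rangeForm (l ++ [s]) := by
  rw [mergeStr_eq, rangeForm_length]
  unfold rangeForm
  rw [List.map_append]
  simp only [List.map_cons, List.map_nil]
  rw [zlMax_append]
  apply List.map_congr_left
  intro i hi
  rw [List.map_append]
  simp only [List.map_cons, List.map_nil]
  congr 1
  by_cases h : i < zlMax (l.map String.toList)
  · rw [List.getD_eq_getElem?_getD, List.getElem?_map, List.getElem?_range h]
    rfl
  · have hnone : (List.map (fun r => List.map (fun s => zlEntry r s.toList) l)
        (List.range (zlMax (List.map String.toList l))))[i]? = none :=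
      List.getElem?_eq_none (by simp only [List.length_map, List.length_range]; omega)
    rw [List.getD_eq_getElem?_getD, hnone]
    simp only [Option.getD_none]
    symm
    rw [List.eq_replicate_iff]
    refine ⟨by simp, ?_⟩
    intro b hb
    rw [List.mem_map] at hb
    obtain ⟨t, ht, rfl⟩ := hb
    exact zlEntry_eos i t.toList (le_trans (zlMax_le l t ht) (by omega))

-- the fold in composeMatrix_alt maintains (rangeForm of processed prefix, its length)
theorem alt_foldl_inv : ∀ (rest l : List String),
    rest.foldl (fun (st : List (List String) × Nat) s =>
      (mergeStr st.1 s.toList st.2, st.2 + 1)) (rangeForm l, l.length)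
      = (rangeForm (l ++ rest), (l ++ rest).length) := by
  intro rest
  induction rest with
  | nil => intro l; simp
  | cons s rest ih =>
    intro l
    simp only [List.foldl_cons, mergeStr_rangeForm]
    have : (l ++ [s]).length = l.length + 1 := by simp
    rw [← this, ih (l ++ [s])]
    simp

theorem composeMatrix_alt_eq (ips : List String) :
    composeMatrix_alt ips = rangeForm ips := by
  unfold composeMatrix_alt
  have h0 : (([] : List (List String)), 0) = (rangeForm [], ([] : List String).length) := by
    simp [rangeForm, zlMax]
  rw [h0, alt_foldl_inv ips []]
  simp

-- ===== lemmas characterising A =====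

-- inner loop of A: appending one entry per string to m[row]
theorem inner_foldl (ss : List String) (e : String → String) :
    ∀ (m : List (List String)) (r : Nat), r < m.length →
    ss.foldl (fun m s => m.set r (m.getD r [] ++ [e s])) m
      = m.set r (m.getD r [] ++ ss.map e) := by
  induction ss with
  | nil =>
    intro m r hr
    simp [List.getD_eq_getElem?_getD, List.getElem?_eq_getElem hr, List.set_getElem_self]
  | cons s ss ih =>
    intro m r hr
    simp only [List.foldl_cons, List.map_cons]
    rw [ih (m.set r (m.getD r [] ++ [e s])) r (by simpa using hr)]
    rw [List.set_set]
    congr 1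
    have : (m.set r (m.getD r [] ++ [e s])).getD r [] = m.getD r [] ++ [e s] := by
      simp [List.getD_eq_getElem?_getD, hr]
    rw [this, List.append_assoc]
    simp

-- outer loop of A, characterised pointwise
theorem outer_foldl (v : Nat → List String) :
    ∀ (rs : List Nat) (m : List (List String)), rs.Nodup → (∀ r ∈ rs, r < m.length) →
    ∀ i : Nat,
    (rs.foldl (fun m r => m.set r (m.getD r [] ++ v r)) m)[i]?
      = if i ∈ rs then some (m.getD i [] ++ v i) else m[i]? := by
  intro rs
  induction rs with
  | nil => intro m _ _ i; simp
  | cons r rs ih =>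
    intro m hnd hlt i
    obtain ⟨hrmem, hnd'⟩ := List.nodup_cons.mp hnd
    simp only [List.foldl_cons]
    have hrm : r < m.length := hlt r (List.mem_cons_self ..)
    rw [ih (m.set r (m.getD r [] ++ v r)) hnd'
        (fun r' hr' => by simpa using hlt r' (List.mem_cons_of_mem _ hr')) i]
    by_cases hirs : i ∈ rs
    · have hir : i ≠ r := fun h => hrmem (h ▸ hirs)
      simp only [hirs, if_pos, List.mem_cons, if_pos]
      simp [List.getD_eq_getElem?_getD, List.getElem?_set_ne (Ne.symm hir)]
    · by_cases hieq : i = r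
      · subst hieq
        simp only [hirs, if_neg, not_false_iff, List.mem_cons, true_or, if_pos]
        simp [List.getD_eq_getElem?_getD, hrm]
      · have : i ∉ (r :: rs) := by simp [hieq, hirs]
        simp [hirs, this, List.getElem?_set_ne (fun h => hieq h.symm)]

-- A's running max equals zlMax of the character columns
theorem foldl_max_strlen (l : List String) :
    ∀ a : Nat, (l.map (fun s => ((s.toList.length : Nat) : Int))).foldl max (a : Int)
      = ((l.foldl (fun b s => max b s.toList.length) a : Nat) : Int) := by
  induction l with
  | nil => intro a; simp
  | cons s l ih =>
    intro a
    simp only [List.map_cons, List.foldl_cons]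
    rw [← Nat.cast_max, ih]

theorem foldl_max_eq_zlMax (l : List String) :
    ∀ a : Nat, l.foldl (fun b s => max b s.toList.length) a = max a (zlMax (l.map String.toList)) := by
  induction l with
  | nil => intro a; simp [zlMax]
  | cons s l ih => intro a; simp only [List.foldl_cons, List.map_cons, zlMax, ih]; omega

theorem maxStrLen_eq (ips : List String) :
    ips.foldl (fun _ _ => (PySem.List.max? (ips.map (fun s => PySem.Str.len s)) (fun x => x)).getD 0) (0 : Int)
      = ((zlMax (ips.map String.toList) : Nat) : Int) := by
  cases ips with
  | nil => simp [zlMax]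
  | cons s l =>
    have hconst : ∀ (t : List String) (K : Int), t.foldl (fun _ _ => K) K = K := by
      intro t K; induction t <;> simp_all
    simp only [List.foldl_cons]
    rw [hconst]
    simp only [List.map_cons, PySem.List.max?_id_cons, Option.getD_some, PySem.Str.len_eq]
    rw [foldl_max_strlen l s.toList.length, foldl_max_eq_zlMax]
    simp only [zlMax]

-- A's per-cell expression equals zlEntry
theorem rowEntry_eq (r : Nat) (s : String) :
    (if (r : Int) < PySem.Str.len s
     then ((PySem.Str.pyGet? s (r : Int)).map (fun c => String.singleton c)).getD "EOS"
     else "EOS") = zlEntry r s.toList := by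
  rw [PySem.Str.len_eq, PySem.Str.pyGet?_natCast]
  by_cases hr : r < s.toList.length
  · rw [if_pos (by exact_mod_cast hr)]
    rfl
  · rw [if_neg (by exact_mod_cast hr)]
    have hnone : getElem? s.toList r = none := List.getElem?_eq_none (by omega)
    simp [zlEntry, hnone]

theorem composeMatrix_eq (ips : List String) :
    composeMatrix ips = rangeForm ips := by
  unfold composeMatrix rangeForm
  simp only []
  rw [maxStrLen_eq]
  set M := zlMax (ips.map String.toList) with hM
  rw [PySem.List.pyRange_zero_natCast, List.foldl_map, List.map_map]
  have hbody : ∀ (m : List (List String)) (r : Nat), r < m.length →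
      (ips.foldl (fun m s =>
        PySem.List.pySetD m (r : Int) (PySem.List.pyGetD m (r : Int) [] ++
          [if (r : Int) < PySem.Str.len s
           then ((PySem.Str.pyGet? s (r : Int)).map (fun c => String.singleton c)).getD "EOS"
           else "EOS"])) m)
      = m.set r (m.getD r [] ++ ips.map (fun s => zlEntry r s.toList)) := by
    intro m r hr
    rw [← inner_foldl ips (fun s => zlEntry r s.toList) m r hr]
    apply List.foldl_ext
    intro m' s _
    rw [PySem.List.pySetD_natCast, PySem.List.pyGetD_natCast, rowEntry_eq]
  apply List.ext_getElem?
  intro i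
  have key : ∀ (rs : List Nat) (m : List (List String)), (∀ r ∈ rs, r < m.length) →
      rs.foldl (fun m (r : Nat) =>
        ips.foldl (fun m s =>
          PySem.List.pySetD m (r : Int) (PySem.List.pyGetD m (r : Int) [] ++
            [if (r : Int) < PySem.Str.len s
             then ((PySem.Str.pyGet? s (r : Int)).map (fun c => String.singleton c)).getD "EOS"
             else "EOS"])) m) m
        = rs.foldl (fun m r => m.set r (m.getD r [] ++ ips.map (fun s => zlEntry r s.toList))) m := by
    intro rs
    induction rs with
    | nil => intro m _; rfl
    | cons r rs ih =>
      intro m hlt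
      simp only [List.foldl_cons]
      rw [hbody m r (hlt r (List.mem_cons_self ..))]
      exact ih _ (fun r' hr' => by simpa using hlt r' (List.mem_cons_of_mem _ hr'))
  rw [key (List.range M) _ (fun r hr => by
    simp only [List.length_map, List.length_range]; exact List.mem_range.mp hr)]
  rw [outer_foldl (fun r => ips.map (fun s => zlEntry r s.toList)) (List.range M) _
    (List.nodup_range) (fun r hr => by
      simp only [List.length_map, List.length_range]; exact List.mem_range.mp hr) i]
  by_cases hi : i < M
  · simp [List.mem_range, hi, List.getD_eq_getElem?_getD]
  · have hle : M ≤ i := Nat.le_of_not_lt hi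
    simp [List.mem_range, hi]

-- ===== VERDICT =====
theorem composeMatrix_spec : Claim_equal_composeMatrix := by
  intro ips _
  unfold Spec_composeMatrix
  rw [composeMatrix_eq, composeMatrix_alt_eq]
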